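-- pv_equiv track=rewrite | github.com/wlgud0402/dailyalgo | codesignal/longestDigitsPrefix.py | longestDigitsPrefix
-- ===== SOURCE A (Python) =====
-- def longestDigitsPrefix(inputString):
--     answer = ""
--     for i in range(len(inputString)):
--         try:
--             num = int(inputString[i])
--             answer += inputString[i]
--         except:
--             return answer
--
--     return answer
-- ===== SOURCE B (Python) =====
-- def longestDigitsPrefix(inputString):
--     n = len(inputString)
--     cut = next((i for i, c in enumerate(inputString) if not c.isdigit()), n)
--     return inputString[:cut]
-- ===== Notes on version B (the rewrite author's own statement) =====
-- stated objective: idiomatic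
-- what changed: B locates the first non-digit index with a generator/next over enumerate and returns one slice, instead of A's per-character try/except int() loop growing an accumulator string.
import Mathlib
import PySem

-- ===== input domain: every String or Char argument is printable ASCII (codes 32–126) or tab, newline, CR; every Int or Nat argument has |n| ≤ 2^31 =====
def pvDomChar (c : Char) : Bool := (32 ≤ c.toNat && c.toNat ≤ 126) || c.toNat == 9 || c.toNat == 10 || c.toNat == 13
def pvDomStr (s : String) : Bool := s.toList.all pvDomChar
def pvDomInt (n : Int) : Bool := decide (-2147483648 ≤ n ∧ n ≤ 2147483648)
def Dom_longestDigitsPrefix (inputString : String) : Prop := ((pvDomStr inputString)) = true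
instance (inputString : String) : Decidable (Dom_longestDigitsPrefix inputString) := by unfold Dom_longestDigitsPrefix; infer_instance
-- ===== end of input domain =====

-- B replaces A's per-character try/except int() loop (growing an accumulator string) by
-- locating the first non-digit index and returning one slice (idiomatic, same cost).

-- ===== PORT A =====
-- the for/try loop: append s[i] while int(s[i]) succeeds, return the accumulator at the
-- first failure (the accumulator string is carried as its list of characters)
def pvLoopA : List Char → List Char → String
  | acc, [] => String.mk acc
  | acc, c :: rest =>
    match PySem.Int.ofStr? (String.mk [c]) with
    | some _ => pvLoopA (acc ++ [c]) rest
    | none => String.mk acc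

def longestDigitsPrefix (inputString : String) : String :=
  pvLoopA [] inputString.toList

-- ===== PORT B =====
-- cut = next((i for i, c in enumerate(s) if not c.isdigit()), len(s)); return s[:cut]
-- (List.findIdx returns the length when no element matches, exactly next's default)
def longestDigitsPrefix_alt (inputString : String) : String :=
  let l := inputString.toList
  let cut := l.findIdx (fun c => !PySem.Chars.isdigit c)
  String.mk (l.take cut)

-- ===== PRECONDITION & SPEC =====
def Spec_longestDigitsPrefix (inputString : String) (out : String) : Prop := out = longestDigitsPrefix_alt inputString
instance (inputString : String) (out : String) : Decidable (Spec_longestDigitsPrefix inputString out) := by unfold Spec_longestDigitsPrefix; infer_instance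

-- ===== CLAIM (what is proved, stated in full; the proofs are below) =====
def Claim_equal_longestDigitsPrefix : Prop := ∀ (inputString : String), Dom_longestDigitsPrefix inputString → Spec_longestDigitsPrefix inputString (longestDigitsPrefix inputString)

-- ===== LEMMAS AND PROOFS =====

-- on the 128 ASCII code points, int(c) succeeds exactly when c.isdigit() holds
theorem pv_ascii_int_isdigit : ∀ n : Fin 128,
    (PySem.Int.ofStr? (String.mk [Char.ofNat n.val])).isSome
      = PySem.Chars.isdigit (Char.ofNat n.val) := by decide

theorem pv_char_int_isdigit (c : Char) (h : pvDomChar c = true) :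
    (PySem.Int.ofStr? (String.mk [c])).isSome = PySem.Chars.isdigit c := by
  have hlt : c.toNat < 128 := by
    simp [pvDomChar] at h
    omega
  have := pv_ascii_int_isdigit ⟨c.toNat, hlt⟩
  simpa [Char.ofNat_toNat] using this

theorem pv_loopA_takeWhile (l acc : List Char) (h : ∀ c ∈ l, pvDomChar c = true) :
    pvLoopA acc l = String.mk (acc ++ l.takeWhile PySem.Chars.isdigit) := by
  induction l generalizing acc with
  | nil => simp [pvLoopA]
  | cons c rest ih =>
    have hc : (PySem.Int.ofStr? (String.mk [c])).isSome = PySem.Chars.isdigit c :=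
      pv_char_int_isdigit c (h c (List.mem_cons_self))
    by_cases hd : PySem.Chars.isdigit c = true
    · rw [hd] at hc
      obtain ⟨v, hv⟩ := Option.isSome_iff_exists.mp hc
      rw [pvLoopA, hv, ih (acc ++ [c]) (fun x hx => h x (List.mem_cons_of_mem _ hx))]
      simp [List.takeWhile_cons, hd]
    · have hd' : PySem.Chars.isdigit c = false := by simpa using hd
      rw [hd'] at hc
      have hn : PySem.Int.ofStr? (String.mk [c]) = none := by
        cases hv : PySem.Int.ofStr? (String.mk [c]) with
        | none => rfl
        | some v => rw [hv] at hc; simp at hc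
      rw [pvLoopA, hn]
      simp [List.takeWhile_cons, hd']

theorem pv_take_findIdx (p : Char → Bool) (l : List Char) :
    l.take (l.findIdx (fun c => !p c)) = l.takeWhile p := by
  induction l with
  | nil => simp
  | cons c rest ih =>
    by_cases hd : p c = true
    · simp [List.findIdx_cons, List.takeWhile_cons, hd, ih]
    · have hd' : p c = false := by simpa using hd
      simp [List.findIdx_cons, List.takeWhile_cons, hd']

-- ===== VERDICT (by name: the statement is the Claim_ definition above) =====
theorem longestDigitsPrefix_spec : Claim_equal_longestDigitsPrefix := by
  intro s hdom
  unfold Spec_longestDigitsPrefix longestDigitsPrefix longestDigitsPrefix_alt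
  have h : ∀ c ∈ s.toList, pvDomChar c = true := by
    have hd : pvDomStr s = true := hdom
    intro c hc
    exact List.all_eq_true.mp hd c hc
  rw [pv_loopA_takeWhile _ _ h]
  simp only [List.nil_append]
  rw [pv_take_findIdx PySem.Chars.isdigit s.toList]
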